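-- pv_equiv track=rewrite | github.com/BernardMoy/Advent-of-code-2023 | Desktop/aoc/day13/aoc13part1.py | reflection_vert
-- ===== SOURCE A (Python) =====
-- def reflection_vert (area):
--
--     vlen = len(area)
--     hlen = len(area[0])
--
--     # Vertical
--     for j in range(hlen):
--         violated = False
--         for x in range(j+1):
--             if  j+x+1 >= hlen or j-x<0 or all(area[i][j-x] == area[i][j+x+1] for i in range(vlen)):
--                 continue
--             else:
--                 violated = True
--
--         if not violated:
--             return j
--
--     return None
-- ===== SOURCE B (Python) =====
-- def reflection_vert(area):
--     hlen = len(area[0])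
--     cols = [[row[j] for row in area] for j in range(hlen)]
--     for j in range(hlen):
--         left = cols[:j + 1][::-1]
--         right = cols[j + 1:]
--         k = min(len(left), len(right))
--         if left[:k] == right[:k]:
--             return j
--     return None
-- ===== Notes on version B (the rewrite author's own statement) =====
-- stated objective: alternative
-- what changed: B transposes the grid into a column list once and tests each axis j with a single reversed-prefix comparison (reverse the left block of columns and compare it to the right block over their common length), replacing A's nested x-loop that rescans every row character by character for every symmetric column pair, including out-of-range pairs.
-- outside the precondition, e.g. on reflection_vert(['ab', 'xy', 'a']): A returns 1, B raises IndexError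
import Mathlib
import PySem

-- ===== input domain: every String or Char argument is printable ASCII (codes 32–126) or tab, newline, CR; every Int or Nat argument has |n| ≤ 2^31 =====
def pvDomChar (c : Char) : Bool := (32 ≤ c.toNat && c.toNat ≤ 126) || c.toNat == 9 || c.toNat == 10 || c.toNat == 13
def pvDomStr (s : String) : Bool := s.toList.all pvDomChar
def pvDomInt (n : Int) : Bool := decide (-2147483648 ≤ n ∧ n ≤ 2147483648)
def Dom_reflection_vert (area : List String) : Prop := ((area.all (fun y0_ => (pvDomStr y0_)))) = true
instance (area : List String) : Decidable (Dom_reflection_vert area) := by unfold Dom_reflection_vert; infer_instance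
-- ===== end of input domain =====

-- B transposes the grid into a list of columns once and tests each axis with one
-- reversed-prefix comparison of column blocks, instead of A's nested x-loop rescanning
-- every row per symmetric column pair; return value proved equal to A's on Pre_.

-- ===== PORT A =====
def reflection_vert (area : List String) : Option Int :=
  let vlen := area.length
  let hlen := (area.headD "").toList.length
  Option.map (fun (j : Nat) => (j : Int))
    ((List.range hlen).find? (fun (j : Nat) =>
      !((List.range (j+1)).foldl (fun (violated : Bool) (x : Nat) =>
          if (decide ((j:Int)+(x:Int)+1 ≥ (hlen:Int)) || decide ((j:Int)-(x:Int) < 0) ||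
              (List.range vlen).all (fun (i : Nat) =>
                PySem.Str.pyGet? (area.getD i "") ((j:Int)-(x:Int)) ==
                PySem.Str.pyGet? (area.getD i "") ((j:Int)+(x:Int)+1)))
          then violated else true) false)))

-- ===== PORT B =====
-- Source B's column lists are ported as List Char lists; its slices cols[:j+1][::-1],
-- cols[j+1:], l[:k] (nonnegative bounds) are List.take/reverse/drop.
def reflection_vert_alt (area : List String) : Option Int :=
  let hlen := (area.headD "").toList.length
  let cols : List (List Char) := (List.range hlen).map (fun (j : Nat) =>
    area.map (fun row => (PySem.Str.pyGet? row (j : Int)).getD ' '))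
  Option.map (fun (j : Nat) => (j : Int))
    ((List.range hlen).find? (fun (j : Nat) =>
      let left := (cols.take (j+1)).reverse
      let right := cols.drop (j+1)
      let k := min left.length right.length
      left.take k == right.take k))

-- ===== PRECONDITION & SPEC =====
-- Pre_ excludes the empty list (A raises IndexError on area[0]) and ragged inputs with a
-- row shorter than the first row: whether A raises there is an accident of short-circuit
-- evaluation order, and B (which builds every column eagerly) raises IndexError on them.
def Pre_reflection_vert (area : List String) : Prop :=
  area ≠ [] ∧ ∀ s ∈ area, (area.headD "").toList.length ≤ s.toList.length
instance (area : List String) : Decidable (Pre_reflection_vert area) := by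
  unfold Pre_reflection_vert; infer_instance

def pvWitness_reflection_vert : List String := ["#.##.", "..##.", "#.#.#"]

def Spec_reflection_vert (area : List String) (out : Option Int) : Prop := out = reflection_vert_alt area
instance (area : List String) (out : Option Int) : Decidable (Spec_reflection_vert area out) := by unfold Spec_reflection_vert; infer_instance

-- ===== CLAIM (what is proved, stated in full; the proofs are below) =====
def Claim_equal_reflection_vert : Prop := ∀ (area : List String), Dom_reflection_vert area → Pre_reflection_vert area → Spec_reflection_vert area (reflection_vert area)

-- ===== LEMMAS AND PROOFS =====

-- A's inner loop only ever sets the flag to true: it is 'any (¬ condition)'.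
theorem foldl_violated_flag (f : Nat → Bool) (l : List Nat) (b : Bool) :
    l.foldl (fun v x => if f x then v else true) b = (b || l.any (fun x => !f x)) := by
  induction l generalizing b with
  | nil => simp
  | cons a t ih =>
    rw [List.foldl_cons, ih]
    cases hfa : f a <;> simp [hfa]

theorem find?_congr_mem {α : Type} (l : List α) (p q : α → Bool)
    (h : ∀ a ∈ l, p a = q a) : l.find? p = l.find? q := by
  induction l with
  | nil => rfl
  | cons a t ih =>
    simp only [List.find?_cons]
    rw [h a (by simp)]
    cases q a with
    | true => rfl
    | false => exact ih (fun x hx => h x (by simp [hx]))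

-- prefix equality is pointwise equality below k
theorem take_eq_take_iff_getElem? {α : Type} (l1 l2 : List α) (k : Nat) :
    l1.take k = l2.take k ↔ ∀ x < k, l1[x]? = l2[x]? := by
  rw [List.ext_getElem?_iff]
  constructor
  · intro h x hx
    have := h x
    rwa [List.getElem?_take, List.getElem?_take, if_pos hx, if_pos hx] at this
  · intro h x
    rw [List.getElem?_take, List.getElem?_take]
    split_ifs with hx
    · exact h x hx
    · rfl

-- ===== VERDICT (by name: the statement is the Claim_ definition above) =====
theorem reflection_vert_spec : Claim_equal_reflection_vert := by
  intro area _hdom hpre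
  obtain ⟨hne, hlen_le⟩ := hpre
  unfold Spec_reflection_vert reflection_vert reflection_vert_alt
  dsimp only
  set hlen := (area.headD "").toList.length with hhlen
  set f : Nat → List Char := fun m => area.map (fun row => (PySem.Str.pyGet? row (m : Int)).getD ' ') with hf
  have hcols_len : ((List.range hlen).map f).length = hlen := by simp
  have hcols_get : ∀ m < hlen, ((List.range hlen).map f)[m]? = some (f m) := by
    intro m hm
    rw [List.getElem?_map, List.getElem?_range hm, Option.map_some]
  refine congrArg (Option.map fun (j : Nat) => (j : Int)) (find?_congr_mem _ _ _ ?_)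
  intro j hj
  rw [List.mem_range] at hj
  -- B's per-j predicate: reduce to pointwise column equality below k
  have hlleft : (((List.range hlen).map f).take (j+1)).reverse.length = j + 1 := by
    simp [hcols_len]; omega
  have hlright : (((List.range hlen).map f).drop (j+1)).length = hlen - (j+1) := by
    simp [hcols_len]
  have hltake : (((List.range hlen).map f).take (j+1)).length = j + 1 := by
    simp [hcols_len]; omega
  rw [foldl_violated_flag, Bool.false_or, Bool.eq_iff_iff]
  simp only [Bool.not_eq_eq_eq_not, Bool.not_true, List.any_eq_false, Bool.not_eq_false,
    List.all_eq_true, List.mem_range, Bool.or_eq_true, decide_eq_true_eq, beq_iff_eq,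
    take_eq_take_iff_getElem?]
  rw [hlleft, hlright]
  constructor
  · -- A's condition holds for all x < j+1  →  pointwise column equality
    intro h x hx
    have hxk : x < min (j+1) (hlen - (j+1)) := hx
    have hxj : x < j + 1 := lt_of_lt_of_le hxk (min_le_left _ _)
    have hxh : x < hlen - (j+1) := lt_of_lt_of_le hxk (min_le_right _ _)
    have hx1 : j - x < hlen := by omega
    have hx2 : j + 1 + x < hlen := by omega
    rw [List.getElem?_reverse (by rw [hltake] ; omega), hltake, List.getElem?_take,
      if_pos (by omega : j + 1 - 1 - x < j + 1), List.getElem?_drop,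
      hcols_get _ (by omega : j + 1 - 1 - x < hlen), hcols_get _ hx2]
    have hjx : j + 1 - 1 - x = j - x := by omega
    rw [hjx, Option.some_inj]
    rcases h x hxj with (h1 | h2) | h3
    · omega
    · omega
    · -- column equality from per-row character equality
      rw [hf]
      apply List.map_congr_left
      intro row hrow
      obtain ⟨i, hi, rfl⟩ := List.getElem_of_mem hrow
      have hh := h3 i hi
      rw [List.getD_eq_getElem area "" hi] at hh
      have e1 : (j:Int) - (x:Int) = ((j - x : Nat) : Int) := by omega
      have e2 : (j:Int) + (x:Int) + 1 = ((j + 1 + x : Nat) : Int) := by push_cast; ring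
      rw [e1, e2] at hh
      exact congrArg (fun o : Option Char => o.getD ' ') hh
  · -- pointwise column equality below k  →  A's condition for all x < j+1
    intro h x hxj
    by_cases hbig : (j:Int) + (x:Int) + 1 ≥ (hlen:Int)
    · left; left; exact hbig
    · right
      have hx2 : j + 1 + x < hlen := by omega
      have hx1 : j - x < hlen := by omega
      have hxk : x < min (j+1) (hlen - (j+1)) := by omega
      have hcol := h x hxk
      rw [List.getElem?_reverse (by rw [hltake] ; omega), hltake, List.getElem?_take,
        if_pos (by omega : j + 1 - 1 - x < j + 1), List.getElem?_drop,
        hcols_get _ (by omega : j + 1 - 1 - x < hlen), hcols_get _ hx2,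
        Option.some_inj, (by omega : j + 1 - 1 - x = j - x)] at hcol
      intro i hi
      have hrl : hlen ≤ area[i].toList.length := hlen_le _ (List.getElem_mem hi)
      have hpt := congrArg (fun l : List Char => l[i]?) hcol
      rw [hf] at hpt
      simp only [List.getElem?_map, List.getElem?_eq_getElem hi, Option.map_some] at hpt
      rw [Option.some_inj] at hpt
      have e1 : (j:Int) - (x:Int) = ((j - x : Nat) : Int) := by omega
      have e2 : (j:Int) + (x:Int) + 1 = ((j + 1 + x : Nat) : Int) := by push_cast; ring
      rw [List.getD_eq_getElem area "" hi, e1, e2]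
      have h1 : j - x < area[i].toList.length := by omega
      have h2 : j + 1 + x < area[i].toList.length := by omega
      simp only [pysem] at hpt ⊢
      rw [List.getElem?_eq_getElem h1, List.getElem?_eq_getElem h2] at hpt ⊢
      simp only [Option.getD_some] at hpt
      simp [hpt]
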